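-- pv_equiv track=rewrite | github.com/Noradeus/Codons | Codons/biology.py | codons_stop
-- ===== SOURCE A (Python) =====
-- def incrLettre(chn,x):
--     if x==len(chn)+1:
--         return "A"+chn
--     elif x==1:
--         if chn[-x]=="A":
--             return chn[:-x]+"U"
--         elif chn[-x]=="U":
--             return chn[:-x]+"G"
--         elif chn[-x]=="G":
--             return chn[:-x]+"C"
--         elif chn[-x]=="C":
--             return incrLettre(chn[:-x]+"A",x+1)
--     else:
--         if chn[-x]=="A":
--             return chn[:-x]+"U"+chn[-x+1:]
--         elif chn[-x]=="U":
--             return chn[:-x]+"G"+chn[-x+1:]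
--         elif chn[-x]=="G":
--             return chn[:-x]+"C"+chn[-x+1:]
--         elif chn[-x]=="C":
--             return incrLettre(chn[:-x]+"A"+chn[-x+1:],x+1)
--
-- def codons_stop(dico):
--     tmp="AAA"
--     tab_dic=list(dico)
--     tab=[]
--     while len(tmp)<4:
--         if not tmp in tab_dic:
--             tab.append(tmp)
--         tmp=incrLettre(tmp,1)
--     return tab
-- ===== SOURCE B (Python) =====
-- def codons_stop(dico):
--     bases = "AUGC"
--     return [a + b + c
--             for a in bases for b in bases for c in bases
--             if a + b + c not in dico]
-- ===== Notes on version B (the rewrite author's own statement) =====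
-- stated objective: simpler
-- what changed: Replaces the recursive string-odometer incrLettre and the while-loop with a direct triple comprehension over the bases 'AUGC' (leftmost base outermost), keeping codons not in dico.
import Mathlib
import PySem

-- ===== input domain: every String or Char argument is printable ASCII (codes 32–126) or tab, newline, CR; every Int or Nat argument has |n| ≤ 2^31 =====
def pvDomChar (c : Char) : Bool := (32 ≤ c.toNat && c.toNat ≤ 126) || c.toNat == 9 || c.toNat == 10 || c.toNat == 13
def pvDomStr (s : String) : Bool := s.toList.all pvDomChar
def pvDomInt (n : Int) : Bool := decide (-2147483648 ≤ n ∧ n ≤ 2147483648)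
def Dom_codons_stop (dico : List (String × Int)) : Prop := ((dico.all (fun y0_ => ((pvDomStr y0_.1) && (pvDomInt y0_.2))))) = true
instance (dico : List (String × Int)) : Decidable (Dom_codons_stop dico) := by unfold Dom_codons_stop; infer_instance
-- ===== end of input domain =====

-- B replaces A's recursive string-odometer with a direct triple enumeration over the bases 'AUGC' (simpler); same return value.

-- ===== PORT A =====
-- incrLettre works on the codon as a List Char; `fuel` only makes the Int-indexed
-- recursion (x ← x+1 up to len+1) structurally terminating; `none` = Python's None.
def incrAux : Nat → List Char → Int → Option (List Char)
  | 0, _, _ => none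
  | f+1, chn, x =>
    if x = (chn.length : Int) + 1 then some ('A' :: chn)
    else if x = 1 then
      match PySem.List.pyGet? chn (-x) with
      | some 'A' => some (PySem.List.slice chn none (some (-x)) ++ ['U'])
      | some 'U' => some (PySem.List.slice chn none (some (-x)) ++ ['G'])
      | some 'G' => some (PySem.List.slice chn none (some (-x)) ++ ['C'])
      | some 'C' => incrAux f (PySem.List.slice chn none (some (-x)) ++ ['A']) (x + 1)
      | _ => none
    else
      match PySem.List.pyGet? chn (-x) with
      | some 'A' => some (PySem.List.slice chn none (some (-x)) ++ ['U'] ++ PySem.List.slice chn (some (-x + 1)) none)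
      | some 'U' => some (PySem.List.slice chn none (some (-x)) ++ ['G'] ++ PySem.List.slice chn (some (-x + 1)) none)
      | some 'G' => some (PySem.List.slice chn none (some (-x)) ++ ['C'] ++ PySem.List.slice chn (some (-x + 1)) none)
      | some 'C' => incrAux f (PySem.List.slice chn none (some (-x)) ++ ['A'] ++ PySem.List.slice chn (some (-x + 1)) none) (x + 1)
      | _ => none

def incrLettre (chn : List Char) (x : Int) : Option (List Char) :=
  incrAux (chn.length + 2) chn x

-- the while loop; fuel 65 covers the 64 iterations; `none` from incrLettre is
-- unreachable from "AAA" (Python would raise TypeError at len(None) there).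
def loopA (keys : List String) : Nat → List Char → List String → List String
  | 0, _, tab => tab
  | f+1, tmp, tab =>
    if tmp.length < 4 then
      let tab' := if !(keys.contains (String.ofList tmp)) then tab ++ [String.ofList tmp] else tab
      match incrLettre tmp 1 with
      | some t => loopA keys f t tab'
      | none => tab'
    else tab

def codons_stop (dico : List (String × Int)) : List String :=
  let tab_dic := dico.map Prod.fst   -- list(dico) on a dict = its keys
  loopA tab_dic 65 ['A', 'A', 'A'] []

-- ===== PORT B =====
def codons_stop_alt (dico : List (String × Int)) : List String :=
  let bases : List Char := ['A', 'U', 'G', 'C']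
  bases.flatMap (fun a => bases.flatMap (fun b => bases.flatMap (fun c =>
    if !((dico.map Prod.fst).contains (String.ofList [a, b, c])) then [String.ofList [a, b, c]] else [])))

-- ===== PRECONDITION & SPEC =====
def Spec_codons_stop (dico : List (String × Int)) (out : List String) : Prop := out = codons_stop_alt dico
instance (dico : List (String × Int)) (out : List String) : Decidable (Spec_codons_stop dico out) := by unfold Spec_codons_stop; infer_instance

-- ===== CLAIM (what is proved, stated in full; the proofs are below) =====
def Claim_equal_codons_stop : Prop := ∀ (dico : List (String × Int)), Dom_codons_stop dico → Spec_codons_stop dico (codons_stop dico)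

-- ===== LEMMAS AND PROOFS =====
lemma loopA_append (keys : List String) : ∀ (f : Nat) (tmp : List Char) (tab : List String),
    loopA keys f tmp tab = tab ++ loopA keys f tmp [] := by
  intro f
  induction f with
  | zero => intro tmp tab; simp [loopA]
  | succ n ih =>
    intro tmp tab
    by_cases h4 : tmp.length < 4
    · simp only [loopA, if_pos h4]
      cases h : incrLettre tmp 1 with
      | some t =>
        simp only []
        rw [ih t, ih t (if !(keys.contains (String.ofList tmp)) then [] ++ [String.ofList tmp] else [])]
        split_ifs <;> simp
      | none => split_ifs <;> simp
    · simp [loopA, if_neg h4]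

lemma loopA_step (keys : List String) (f : Nat) (tmp next : List Char)
    (h2 : incrLettre tmp 1 = some next) (h1 : tmp.length < 4) :
    loopA keys (f + 1) tmp [] =
      (if !(keys.contains (String.ofList tmp)) then [String.ofList tmp] else []) ++ loopA keys f next [] := by
  simp only [loopA, if_pos h1, h2]
  rw [loopA_append keys f next]
  split_ifs <;> simp

lemma loopA_stop (keys : List String) (f : Nat) (tmp : List Char) (h : ¬ tmp.length < 4) :
    loopA keys f tmp [] = [] := by
  cases f <;> simp [loopA, h]

lemma loopA_main (keys : List String) :
    loopA keys 65 ['A','A','A'] [] =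
      (['A','U','G','C'] : List Char).flatMap (fun a => (['A','U','G','C'] : List Char).flatMap (fun b => (['A','U','G','C'] : List Char).flatMap (fun c =>
        if !(keys.contains (String.ofList [a, b, c])) then [String.ofList [a, b, c]] else []))) := by
  rw [show (65:Nat) = 64+1 from rfl, loopA_step keys 64 ['A','A','A'] ['A','A','U'] (by decide) (by decide)]
  rw [show (64:Nat) = 63+1 from rfl, loopA_step keys 63 ['A','A','U'] ['A','A','G'] (by decide) (by decide)]
  rw [show (63:Nat) = 62+1 from rfl, loopA_step keys 62 ['A','A','G'] ['A','A','C'] (by decide) (by decide)]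
  rw [show (62:Nat) = 61+1 from rfl, loopA_step keys 61 ['A','A','C'] ['A','U','A'] (by decide) (by decide)]
  rw [show (61:Nat) = 60+1 from rfl, loopA_step keys 60 ['A','U','A'] ['A','U','U'] (by decide) (by decide)]
  rw [show (60:Nat) = 59+1 from rfl, loopA_step keys 59 ['A','U','U'] ['A','U','G'] (by decide) (by decide)]
  rw [show (59:Nat) = 58+1 from rfl, loopA_step keys 58 ['A','U','G'] ['A','U','C'] (by decide) (by decide)]
  rw [show (58:Nat) = 57+1 from rfl, loopA_step keys 57 ['A','U','C'] ['A','G','A'] (by decide) (by decide)]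
  rw [show (57:Nat) = 56+1 from rfl, loopA_step keys 56 ['A','G','A'] ['A','G','U'] (by decide) (by decide)]
  rw [show (56:Nat) = 55+1 from rfl, loopA_step keys 55 ['A','G','U'] ['A','G','G'] (by decide) (by decide)]
  rw [show (55:Nat) = 54+1 from rfl, loopA_step keys 54 ['A','G','G'] ['A','G','C'] (by decide) (by decide)]
  rw [show (54:Nat) = 53+1 from rfl, loopA_step keys 53 ['A','G','C'] ['A','C','A'] (by decide) (by decide)]
  rw [show (53:Nat) = 52+1 from rfl, loopA_step keys 52 ['A','C','A'] ['A','C','U'] (by decide) (by decide)]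
  rw [show (52:Nat) = 51+1 from rfl, loopA_step keys 51 ['A','C','U'] ['A','C','G'] (by decide) (by decide)]
  rw [show (51:Nat) = 50+1 from rfl, loopA_step keys 50 ['A','C','G'] ['A','C','C'] (by decide) (by decide)]
  rw [show (50:Nat) = 49+1 from rfl, loopA_step keys 49 ['A','C','C'] ['U','A','A'] (by decide) (by decide)]
  rw [show (49:Nat) = 48+1 from rfl, loopA_step keys 48 ['U','A','A'] ['U','A','U'] (by decide) (by decide)]
  rw [show (48:Nat) = 47+1 from rfl, loopA_step keys 47 ['U','A','U'] ['U','A','G'] (by decide) (by decide)]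
  rw [show (47:Nat) = 46+1 from rfl, loopA_step keys 46 ['U','A','G'] ['U','A','C'] (by decide) (by decide)]
  rw [show (46:Nat) = 45+1 from rfl, loopA_step keys 45 ['U','A','C'] ['U','U','A'] (by decide) (by decide)]
  rw [show (45:Nat) = 44+1 from rfl, loopA_step keys 44 ['U','U','A'] ['U','U','U'] (by decide) (by decide)]
  rw [show (44:Nat) = 43+1 from rfl, loopA_step keys 43 ['U','U','U'] ['U','U','G'] (by decide) (by decide)]
  rw [show (43:Nat) = 42+1 from rfl, loopA_step keys 42 ['U','U','G'] ['U','U','C'] (by decide) (by decide)]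
  rw [show (42:Nat) = 41+1 from rfl, loopA_step keys 41 ['U','U','C'] ['U','G','A'] (by decide) (by decide)]
  rw [show (41:Nat) = 40+1 from rfl, loopA_step keys 40 ['U','G','A'] ['U','G','U'] (by decide) (by decide)]
  rw [show (40:Nat) = 39+1 from rfl, loopA_step keys 39 ['U','G','U'] ['U','G','G'] (by decide) (by decide)]
  rw [show (39:Nat) = 38+1 from rfl, loopA_step keys 38 ['U','G','G'] ['U','G','C'] (by decide) (by decide)]
  rw [show (38:Nat) = 37+1 from rfl, loopA_step keys 37 ['U','G','C'] ['U','C','A'] (by decide) (by decide)]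
  rw [show (37:Nat) = 36+1 from rfl, loopA_step keys 36 ['U','C','A'] ['U','C','U'] (by decide) (by decide)]
  rw [show (36:Nat) = 35+1 from rfl, loopA_step keys 35 ['U','C','U'] ['U','C','G'] (by decide) (by decide)]
  rw [show (35:Nat) = 34+1 from rfl, loopA_step keys 34 ['U','C','G'] ['U','C','C'] (by decide) (by decide)]
  rw [show (34:Nat) = 33+1 from rfl, loopA_step keys 33 ['U','C','C'] ['G','A','A'] (by decide) (by decide)]
  rw [show (33:Nat) = 32+1 from rfl, loopA_step keys 32 ['G','A','A'] ['G','A','U'] (by decide) (by decide)]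
  rw [show (32:Nat) = 31+1 from rfl, loopA_step keys 31 ['G','A','U'] ['G','A','G'] (by decide) (by decide)]
  rw [show (31:Nat) = 30+1 from rfl, loopA_step keys 30 ['G','A','G'] ['G','A','C'] (by decide) (by decide)]
  rw [show (30:Nat) = 29+1 from rfl, loopA_step keys 29 ['G','A','C'] ['G','U','A'] (by decide) (by decide)]
  rw [show (29:Nat) = 28+1 from rfl, loopA_step keys 28 ['G','U','A'] ['G','U','U'] (by decide) (by decide)]
  rw [show (28:Nat) = 27+1 from rfl, loopA_step keys 27 ['G','U','U'] ['G','U','G'] (by decide) (by decide)]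
  rw [show (27:Nat) = 26+1 from rfl, loopA_step keys 26 ['G','U','G'] ['G','U','C'] (by decide) (by decide)]
  rw [show (26:Nat) = 25+1 from rfl, loopA_step keys 25 ['G','U','C'] ['G','G','A'] (by decide) (by decide)]
  rw [show (25:Nat) = 24+1 from rfl, loopA_step keys 24 ['G','G','A'] ['G','G','U'] (by decide) (by decide)]
  rw [show (24:Nat) = 23+1 from rfl, loopA_step keys 23 ['G','G','U'] ['G','G','G'] (by decide) (by decide)]
  rw [show (23:Nat) = 22+1 from rfl, loopA_step keys 22 ['G','G','G'] ['G','G','C'] (by decide) (by decide)]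
  rw [show (22:Nat) = 21+1 from rfl, loopA_step keys 21 ['G','G','C'] ['G','C','A'] (by decide) (by decide)]
  rw [show (21:Nat) = 20+1 from rfl, loopA_step keys 20 ['G','C','A'] ['G','C','U'] (by decide) (by decide)]
  rw [show (20:Nat) = 19+1 from rfl, loopA_step keys 19 ['G','C','U'] ['G','C','G'] (by decide) (by decide)]
  rw [show (19:Nat) = 18+1 from rfl, loopA_step keys 18 ['G','C','G'] ['G','C','C'] (by decide) (by decide)]
  rw [show (18:Nat) = 17+1 from rfl, loopA_step keys 17 ['G','C','C'] ['C','A','A'] (by decide) (by decide)]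
  rw [show (17:Nat) = 16+1 from rfl, loopA_step keys 16 ['C','A','A'] ['C','A','U'] (by decide) (by decide)]
  rw [show (16:Nat) = 15+1 from rfl, loopA_step keys 15 ['C','A','U'] ['C','A','G'] (by decide) (by decide)]
  rw [show (15:Nat) = 14+1 from rfl, loopA_step keys 14 ['C','A','G'] ['C','A','C'] (by decide) (by decide)]
  rw [show (14:Nat) = 13+1 from rfl, loopA_step keys 13 ['C','A','C'] ['C','U','A'] (by decide) (by decide)]
  rw [show (13:Nat) = 12+1 from rfl, loopA_step keys 12 ['C','U','A'] ['C','U','U'] (by decide) (by decide)]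
  rw [show (12:Nat) = 11+1 from rfl, loopA_step keys 11 ['C','U','U'] ['C','U','G'] (by decide) (by decide)]
  rw [show (11:Nat) = 10+1 from rfl, loopA_step keys 10 ['C','U','G'] ['C','U','C'] (by decide) (by decide)]
  rw [show (10:Nat) = 9+1 from rfl, loopA_step keys 9 ['C','U','C'] ['C','G','A'] (by decide) (by decide)]
  rw [show (9:Nat) = 8+1 from rfl, loopA_step keys 8 ['C','G','A'] ['C','G','U'] (by decide) (by decide)]
  rw [show (8:Nat) = 7+1 from rfl, loopA_step keys 7 ['C','G','U'] ['C','G','G'] (by decide) (by decide)]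
  rw [show (7:Nat) = 6+1 from rfl, loopA_step keys 6 ['C','G','G'] ['C','G','C'] (by decide) (by decide)]
  rw [show (6:Nat) = 5+1 from rfl, loopA_step keys 5 ['C','G','C'] ['C','C','A'] (by decide) (by decide)]
  rw [show (5:Nat) = 4+1 from rfl, loopA_step keys 4 ['C','C','A'] ['C','C','U'] (by decide) (by decide)]
  rw [show (4:Nat) = 3+1 from rfl, loopA_step keys 3 ['C','C','U'] ['C','C','G'] (by decide) (by decide)]
  rw [show (3:Nat) = 2+1 from rfl, loopA_step keys 2 ['C','C','G'] ['C','C','C'] (by decide) (by decide)]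
  rw [show (2:Nat) = 1+1 from rfl, loopA_step keys 1 ['C','C','C'] ['A','A','A','A'] (by decide) (by decide)]
  rw [loopA_stop keys 1 ['A','A','A','A'] (by decide)]
  simp [List.flatMap_cons]

-- ===== VERDICT (by name: the statement is the Claim_ definition above) =====
theorem codons_stop_spec : Claim_equal_codons_stop := by
  intro dico _
  unfold Spec_codons_stop codons_stop codons_stop_alt
  exact loopA_main (dico.map Prod.fst)
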